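-- pv_equiv track=rewrite | github.com/duvuvu/StudyChat | data/v1/submissions/f24/assignment-6-n-gram-language-models-submissions/user_710bd530-f031-7016-ebe5-ee614a366f14/NgramAutocomplete.py | create_frequency_tables
-- ===== SOURCE A (Python) =====
-- def create_frequency_tables(document, n):
--     """
--     This function constructs a list of `n` frequency tables for an n-gram model, each table capturing character frequencies with increasing conditional dependencies.
--
--     - **Parameters**:
--         - `document`: The text document used to train the model.
--         - `n`: The number of value of `n` for the n-gram model.
--
--     - **Returns**:
--         - Returns a list of n frequency tables.
--     """
--     result = []
--     for i in range(1, n + 1):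
--         currTable = {}          # key = i-gram, value = cnt
--         total = 0
--         j = 0
--         while j < len(document) and j + i <= len(document):
--             s = document[j : j + i]
--             if s not in currTable:
--                 currTable[s] = 0
--             currTable[s] += 1
--             total += 1
--             j += 1
--         result.append(currTable)
--     return result
-- ===== SOURCE B (Python) =====
-- def create_frequency_tables(document, n):
--     result = [dict() for _ in range(n)]
--     total_len = len(document)
--     for j in range(total_len):
--         s = ""
--         for i in range(1, n + 1):
--             if j + i > total_len:
--                 break
--             s += document[j + i - 1]
--             table = result[i - 1]
--             table[s] = table.get(s, 0) + 1
--     return result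
-- ===== Notes on version B (the rewrite author's own statement) =====
-- stated objective: alternative
-- what changed: B makes one pass over start positions, growing each gram incrementally one character at a time and updating all n tables at once, instead of A's one full document scan per gram length with a fresh slice per gram.
import Mathlib
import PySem

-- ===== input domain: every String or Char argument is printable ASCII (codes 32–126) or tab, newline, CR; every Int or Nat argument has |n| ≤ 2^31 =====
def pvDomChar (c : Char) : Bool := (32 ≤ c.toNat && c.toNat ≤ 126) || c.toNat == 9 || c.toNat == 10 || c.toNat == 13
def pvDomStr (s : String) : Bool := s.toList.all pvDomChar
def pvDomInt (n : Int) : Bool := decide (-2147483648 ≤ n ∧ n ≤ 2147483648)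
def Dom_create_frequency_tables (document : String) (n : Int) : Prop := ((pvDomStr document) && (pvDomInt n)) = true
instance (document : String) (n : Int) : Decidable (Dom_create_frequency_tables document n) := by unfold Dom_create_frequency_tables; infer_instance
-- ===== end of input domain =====

-- B builds all n tables in ONE pass over start positions, growing each gram incrementally by one
-- character, instead of A's separate document scan (with a fresh slice per gram) for each gram length.
-- Objective: alternative decomposition; both ports proved to return the same list of tables.

-- ===== PORT A =====
-- the body of A's while loop: `if s not in currTable: currTable[s] = 0` then `currTable[s] += 1`
def pvStepA (d : PySem.Dict String Int) (s : String) : PySem.Dict String Int :=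
  let d1 := if d.contains s then d else d.insert s 0
  d1.insert s (d1.getD s 0 + 1)

-- `while j < len(document) and j + i <= len(document): s = document[j:j+i]; …; j += 1`
-- (the dead local `total` is dropped)
def pvWhileA (doc : List Char) (i : Int) (j : Nat) (d : PySem.Dict String Int) :
    PySem.Dict String Int :=
  if h : (j : Int) < doc.length ∧ (j : Int) + i ≤ doc.length then
    pvWhileA doc i (j + 1)
      (pvStepA d (String.ofList (PySem.List.slice doc (some (j : Int)) (some ((j : Int) + i)))))
  else d
termination_by doc.length - j
decreasing_by omega

def create_frequency_tables (document : String) (n : Int) : List (List (String × Int)) :=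
  ((PySem.List.pyRange 1 (n + 1) 1).foldl
      (fun result i => result ++ [pvWhileA document.toList i 0 PySem.Dict.empty]) []).map
    (fun d => d.items)

-- ===== PORT B =====
-- B's inner loop: `for i in range(1, n+1): if j+i > L: break; s += document[j+i-1]; table = result[i-1]; table[s] = table.get(s,0)+1`
def pvInnerB (doc : List Char) (j : Int) (s : List Char) (is_ : List Int)
    (res : List (PySem.Dict String Int)) : List (PySem.Dict String Int) :=
  match is_ with
  | [] => res
  | i :: rest =>
    if j + i > doc.length then res
    else
      let s' := s ++ [PySem.List.pyGetD doc (j + i - 1) ' ']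
      let d := PySem.List.pyGetD res (i - 1) PySem.Dict.empty
      pvInnerB doc j s' rest
        (res.set (i - 1).toNat (d.insert (String.ofList s') (d.getD (String.ofList s') 0 + 1)))

def create_frequency_tables_alt (document : String) (n : Int) : List (List (String × Int)) :=
  let doc := document.toList
  let init := (PySem.List.pyRange 0 n 1).map (fun _ => PySem.Dict.empty)
  ((PySem.List.pyRange 0 doc.length 1).foldl
      (fun res j => pvInnerB doc j [] (PySem.List.pyRange 1 (n + 1) 1) res) init).map
    (fun d => d.items)

-- ===== PRECONDITION & SPEC =====
def Spec_create_frequency_tables (document : String) (n : Int) (out : List (List (String × Int))) : Prop := out = create_frequency_tables_alt document n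
instance (document : String) (n : Int) (out : List (List (String × Int))) : Decidable (Spec_create_frequency_tables document n out) := by unfold Spec_create_frequency_tables; infer_instance

-- ===== CLAIM (what is proved, stated in full; the proofs are below) =====
def Claim_equal_create_frequency_tables : Prop := ∀ (document : String) (n : Int), Dom_create_frequency_tables document n → Spec_create_frequency_tables document n (create_frequency_tables document n)

-- ===== LEMMAS AND PROOFS =====

-- canonical building blocks shared by the two proofs
def pvSt (d : PySem.Dict String Int) (s : String) : PySem.Dict String Int :=
  d.insert s (d.getD s 0 + 1)

def pvGram (doc : List Char) (k j : Nat) : String := String.ofList ((doc.drop j).take k)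

-- the table of k-grams after the first m start positions have been processed
def pvT (doc : List Char) (k m : Nat) : PySem.Dict String Int :=
  ((List.range (min m (doc.length + 1 - k))).map (pvGram doc k)).foldl pvSt PySem.Dict.empty

lemma pvStepA_eq (d : PySem.Dict String Int) (s : String) : pvStepA d s = pvSt d s := by
  unfold pvStepA pvSt
  by_cases h : d.contains s
  · simp [h]
  · simp only [Bool.not_eq_true] at h
    simp only [h, Bool.false_eq_true, not_false_eq_true, if_neg]
    rw [PySem.Dict.getD_insert_self, PySem.Dict.getD_of_not_contains (h := h)]
    apply PySem.Dict.ext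
    have hc : (d.insert s 0).contains s := PySem.Dict.contains_insert_self d s 0
    rw [PySem.Dict.items_insert_of_contains _ _ hc,
        PySem.Dict.items_insert_of_not_contains _ _ h,
        PySem.Dict.items_insert_of_not_contains _ _ h, List.map_append]
    congr 1
    · rw [show d.items = d.items.map id by simp]
      rw [List.map_map]
      refine List.map_congr_left (fun p hp => ?_)
      have : p.1 ≠ s := by
        intro he
        have : s ∈ d.keys := by
          have := List.mem_map_of_mem (f := Prod.fst) hp
          rwa [he] at this
        rw [← PySem.Dict.contains_iff_mem_keys] at this
        simp [h] at this
      simp [this]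
    · simp

lemma pvWhileA_eq (doc : List Char) (k : Nat) (hk : 1 ≤ k) :
    ∀ (c j : Nat), c = doc.length + 1 - k - j → ∀ d,
      pvWhileA doc (k : Int) j d = ((List.range' j c).map (pvGram doc k)).foldl pvSt d := by
  intro c
  induction c with
  | zero =>
    intro j hc d
    rw [pvWhileA]
    have hn : ¬ ((j : Int) < doc.length ∧ (j : Int) + (k : Int) ≤ doc.length) := by omega
    rw [dif_neg hn]
    simp
  | succ c ih =>
    intro j hc d
    have hjk : j + k ≤ doc.length := by omega
    have hj : j < doc.length := by omega
    rw [pvWhileA]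
    have hcond : ((j : Int) < doc.length ∧ (j : Int) + (k : Int) ≤ doc.length) := by
      constructor <;> omega
    rw [dif_pos hcond]
    rw [List.range'_succ, List.map_cons, List.foldl_cons]
    rw [pvStepA_eq]
    have hslice : PySem.List.slice doc (some (j : Int)) (some ((j : Int) + (k : Int))) =
        (doc.drop j).take k := PySem.List.slice_natCast_add doc j k
    rw [hslice]
    exact ih (j + 1) (by omega) _

lemma pvInnerB_length (doc : List Char) (j : Int) (s : List Char) (is_ : List Int)
    (res : List (PySem.Dict String Int)) : (pvInnerB doc j s is_ res).length = res.length := by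
  induction is_ generalizing s res with
  | nil => rfl
  | cons i rest ih =>
    simp only [pvInnerB]
    split
    · rfl
    · rw [ih, List.length_set]

lemma pvSetGetD {α : Type} (l : List α) (k p : Nat) (a d : α) :
    (l.set k a).getD p d = if p = k ∧ k < l.length then a else l.getD p d := by
  rcases Nat.lt_or_ge p l.length with hp | hp
  · rw [List.getD_eq_getElem _ _ (by rwa [List.length_set]), List.getElem_set,
      List.getD_eq_getElem _ _ hp]
    split
    · next h => rw [if_pos ⟨h.symm, by omega⟩]
    · next h => rw [if_neg (fun hh => h hh.1.symm)]
  · rw [List.getD_eq_default _ _ (by rwa [List.length_set]), List.getD_eq_default _ _ hp]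
    rw [if_neg (by rintro ⟨h1, h2⟩; omega)]

lemma pvInnerB_get (doc : List Char) (n : Int) (j : Nat) :
    ∀ (c : Nat) (i0 : Nat) (s : List Char) (res : List (PySem.Dict String Int)),
      c = (n + 1 - (i0 : Int)).toNat → 1 ≤ i0 → s = (doc.drop j).take (i0 - 1) →
      ∀ (p : Nat),
        (pvInnerB doc (j : Int) s (PySem.List.pyRange (i0 : Int) (n + 1) 1) res).getD p
            PySem.Dict.empty =
          if i0 - 1 ≤ p ∧ p < res.length ∧ (p : Int) < n ∧ j + p + 1 ≤ doc.length
          then pvSt (res.getD p PySem.Dict.empty) (pvGram doc (p + 1) j)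
          else res.getD p PySem.Dict.empty := by
  intro c
  induction c with
  | zero =>
    intro i0 s res hc hi0 hs p
    have hrange : PySem.List.pyRange (i0 : Int) (n + 1) 1 = [] := by
      rw [PySem.List.pyRange_one]
      have : (n + 1 - (i0 : Int)).toNat = 0 := by omega
      rw [this]; rfl
    rw [hrange]
    have hcond : ¬ (i0 - 1 ≤ p ∧ p < res.length ∧ (p : Int) < n ∧ j + p + 1 ≤ doc.length) := by
      rintro ⟨h1, _, h2, _⟩; omega
    rw [if_neg hcond]; rfl
  | succ c ih =>
    intro i0 s res hc hi0 hs p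
    obtain ⟨k, rfl⟩ : ∃ k, i0 = k + 1 := ⟨i0 - 1, by omega⟩
    simp only [Nat.add_sub_cancel] at hs ⊢
    rw [PySem.List.pyRange_one_cons (by omega)]
    simp only [pvInnerB]
    by_cases hbrk : (j : Int) + ((k + 1 : Nat) : Int) > doc.length
    · rw [if_pos hbrk]
      have hcond : ¬ (k ≤ p ∧ p < res.length ∧ (p : Int) < n ∧ j + p + 1 ≤ doc.length) := by
        rintro ⟨h1, _, _, h3⟩; omega
      rw [if_neg hcond]
    · rw [if_neg hbrk]
      have hji : j + k + 1 ≤ doc.length := by omega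
      have hchar : PySem.List.pyGetD doc ((j : Int) + ((k + 1 : Nat) : Int) - 1) ' ' =
          doc.getD (j + k) ' ' := by
        rw [show (j : Int) + ((k + 1 : Nat) : Int) - 1 = ((j + k : Nat) : Int) by omega,
          PySem.List.pyGetD_natCast]
      have hs' : s ++ [PySem.List.pyGetD doc ((j : Int) + ((k + 1 : Nat) : Int) - 1) ' '] =
          (doc.drop j).take (k + 1) := by
        rw [hchar, hs, List.take_add_one]
        congr 1
        rw [List.getElem?_eq_getElem (by rw [List.length_drop]; omega)]
        simp only [Option.toList_some]
        congr 1
        rw [List.getElem_drop, List.getD_eq_getElem _ _ (by omega)]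
      have hidx : PySem.List.pyGetD res (((k + 1 : Nat) : Int) - 1) PySem.Dict.empty =
          res.getD k PySem.Dict.empty := by
        rw [show ((k + 1 : Nat) : Int) - 1 = ((k : Nat) : Int) by omega, PySem.List.pyGetD_natCast]
      have htoNat : (((k + 1 : Nat) : Int) - 1).toNat = k := by omega
      rw [hs', hidx, htoNat, show (((k + 1 : Nat) : Int) + 1) = (((k + 2 : Nat)) : Int) by
        push_cast; ring]
      rw [ih (k + 2) _ _ (by omega) (by omega) (by simp) p]
      rw [List.length_set]
      rw [pvSetGetD]
      split_ifs <;> first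
      | rfl
      | omega
      | (rename_i hpk _; obtain ⟨rfl, -⟩ := hpk; rfl)

lemma pvInnerB_get_one (doc : List Char) (n : Int) (j : Nat)
    (res : List (PySem.Dict String Int)) (p : Nat) :
    (pvInnerB doc (j : Int) [] (PySem.List.pyRange 1 (n + 1) 1) res).getD p PySem.Dict.empty =
      if p < res.length ∧ (p : Int) < n ∧ j + p + 1 ≤ doc.length
      then pvSt (res.getD p PySem.Dict.empty) (pvGram doc (p + 1) j)
      else res.getD p PySem.Dict.empty := by
  have h := pvInnerB_get doc n j (n + 1 - ((1 : Nat) : Int)).toNat 1 [] res rfl (le_refl 1)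
    (by simp) p
  simp only [Nat.cast_one] at h
  rw [h]
  simp only [show (1 : Nat) - 1 = 0 from rfl, Nat.zero_le, true_and]

lemma pvT_succ (doc : List Char) (k m : Nat) (hk : 1 ≤ k) :
    pvT doc k (m + 1) =
      if m + k ≤ doc.length then pvSt (pvT doc k m) (pvGram doc k m) else pvT doc k m := by
  by_cases h : m + k ≤ doc.length
  · rw [if_pos h]
    unfold pvT
    rw [show min (m + 1) (doc.length + 1 - k) = (min m (doc.length + 1 - k)) + 1 by omega,
      List.range_succ, List.map_append, List.foldl_append]
    rw [show min m (doc.length + 1 - k) = m by omega]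
    rfl
  · rw [if_neg h]
    unfold pvT
    rw [show min (m + 1) (doc.length + 1 - k) = min m (doc.length + 1 - k) by omega]

lemma pvStateB (doc : List Char) (n : Int) :
    ∀ m : Nat,
      ((List.range m).foldl
          (fun res (j : Nat) => pvInnerB doc (j : Int) [] (PySem.List.pyRange 1 (n + 1) 1) res)
          ((PySem.List.pyRange 0 n 1).map (fun _ => PySem.Dict.empty))) =
        (List.range n.toNat).map (fun p => pvT doc (p + 1) m) := by
  intro m
  induction m with
  | zero =>
    rw [List.range_zero, List.foldl_nil, PySem.List.pyRange_one 0 n, List.map_map,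
      show (n - 0 : Int) = n by ring]
    refine List.map_congr_left (fun p hp => ?_)
    show PySem.Dict.empty = pvT doc (p + 1) 0
    simp [pvT]
  | succ m ih =>
    rw [List.range_succ, List.foldl_append, List.foldl_cons, List.foldl_nil, ih]
    apply List.ext_getElem
    · simp [pvInnerB_length]
    · intro p hp1 hp2
      rw [List.length_map, List.length_range] at hp2
      rw [← List.getD_eq_getElem _ PySem.Dict.empty hp1]
      rw [pvInnerB_get_one doc n m _ p]
      have hplen : p < ((List.range n.toNat).map (fun p => pvT doc (p + 1) m)).length := by
        rw [List.length_map, List.length_range]; exact hp2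
      have hgetDm : ((List.range n.toNat).map (fun p => pvT doc (p + 1) m)).getD p
          PySem.Dict.empty = pvT doc (p + 1) m := by
        rw [List.getD_eq_getElem _ _ hplen]
        simp
      rw [hgetDm]
      have hR : ((List.range n.toNat).map (fun q => pvT doc (q + 1) (m + 1)))[p]'(by rw [List.length_map, List.length_range]; exact hp2) =
          pvT doc (p + 1) (m + 1) := by simp
      rw [hR, pvT_succ doc (p + 1) m (by omega)]
      rw [List.length_map, List.length_range]
      by_cases hc : m + p + 1 ≤ doc.length
      · rw [if_pos ⟨hp2, by omega, by omega⟩, if_pos (by omega)]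
      · rw [if_neg (by rintro ⟨-, -, h⟩; omega), if_neg (by omega)]

-- ===== VERDICT (by name: the statement is the Claim_ definition above) =====
theorem create_frequency_tables_spec : Claim_equal_create_frequency_tables := by
  intro document n _
  unfold Spec_create_frequency_tables
  simp only [create_frequency_tables, create_frequency_tables_alt]
  rw [PySem.List.foldl_append_singleton_eq_map, List.nil_append]
  rw [PySem.List.pyRange_zero_nat document.toList.length, List.foldl_map]
  rw [pvStateB document.toList n document.toList.length]
  rw [PySem.List.pyRange_one 1 (n + 1), show (n + 1 - 1 : Int) = n by ring]
  rw [List.map_map, List.map_map, List.map_map]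
  refine List.map_congr_left (fun p hp => ?_)
  rw [List.mem_range] at hp
  show (pvWhileA document.toList (1 + (p : Int)) 0 PySem.Dict.empty).items =
    (pvT document.toList (p + 1) document.toList.length).items
  congr 1
  rw [show (1 + (p : Int)) = (((p + 1 : Nat)) : Int) by push_cast; ring]
  rw [pvWhileA_eq document.toList (p + 1) (by omega)
    (document.toList.length + 1 - (p + 1) - 0) 0 rfl]
  unfold pvT
  rw [show min document.toList.length (document.toList.length + 1 - (p + 1)) =
    document.toList.length + 1 - (p + 1) - 0 by omega]
  rw [List.range_eq_range']
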